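-- pv_equiv track=rewrite | github.com/kathrynkleijn/AdventOfCode2024 | scripts/12_Garden_Groups.py | edges_of_region
-- ===== SOURCE A (Python) =====
-- def edges_of_region(region_edges):
--     num_edges = 0
--     for edge_coords in region_edges.values():
--         edge_coords = sorted(edge_coords)
--         for i, coord in enumerate(edge_coords):
--             if coord != edge_coords[i - 1] + 1:
--                 num_edges += 1
--     return num_edges
-- ===== SOURCE B (Python) =====
-- def edges_of_region(region_edges):
--     total = 0
--     for coords in region_edges.values():
--         s = set(coords)
--         runs = sum(1 for x in s if x - 1 not in s)
--         total += len(coords) - len(s) + runs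
--     return total
-- ===== Notes on version B (the rewrite author's own statement) =====
-- stated objective: alternative
-- what changed: A sorts every region's coordinate list and scans it with enumerate and a wrap-around index; B never sorts: it builds a set per region and counts run starts (x with x-1 absent from the set) plus duplicate occurrences (len minus set size), which equals A's boundary count.
import Mathlib
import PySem

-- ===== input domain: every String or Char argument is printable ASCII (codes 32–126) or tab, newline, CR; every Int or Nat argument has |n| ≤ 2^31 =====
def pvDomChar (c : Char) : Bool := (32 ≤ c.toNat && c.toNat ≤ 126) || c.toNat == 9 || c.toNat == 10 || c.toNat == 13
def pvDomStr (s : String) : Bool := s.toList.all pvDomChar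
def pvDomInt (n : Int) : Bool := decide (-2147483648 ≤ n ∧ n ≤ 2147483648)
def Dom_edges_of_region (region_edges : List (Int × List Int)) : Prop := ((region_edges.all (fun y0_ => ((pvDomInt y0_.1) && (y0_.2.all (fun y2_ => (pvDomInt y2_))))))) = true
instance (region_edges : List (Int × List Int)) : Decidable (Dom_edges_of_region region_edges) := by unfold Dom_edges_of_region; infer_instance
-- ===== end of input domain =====

-- B replaces A's per-region sort-and-scan by a sort-free set-based count
-- (duplicate occurrences + run starts); objective: alternative algorithm.

-- ===== PORT A =====
-- sorted(edge_coords) and the wrap-around index edge_coords[i-1] ported with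
-- PySem.List.sorted / pyGetD (the index i-1 is always in range, so pyGetD is exact).
def edges_of_region (region_edges : List (Int × List Int)) : Int :=
  (PySem.Dict.ofList region_edges).values.foldl (fun num_edges edge_coords0 =>
    let edge_coords := PySem.List.sorted edge_coords0 (fun x => x) false
    (PySem.List.enumerate edge_coords).foldl (fun acc p =>
      if p.2 ≠ PySem.List.pyGetD edge_coords (p.1 - 1) 0 + 1 then acc + 1 else acc)
      num_edges) 0

-- ===== PORT B =====
def edges_of_region_alt (region_edges : List (Int × List Int)) : Int :=
  (PySem.Dict.ofList region_edges).values.foldl (fun total coords =>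
    let s := PySem.Set.ofList coords
    let runs := List.foldl (fun c x =>
      if !(PySem.Set.contains s (x - 1)) then c + 1 else c) (0 : Int) s
    total + ((coords.length : Int) - PySem.Set.len s) + runs) 0

-- ===== PRECONDITION & SPEC =====
def Spec_edges_of_region (region_edges : List (Int × List Int)) (out : Int) : Prop := out = edges_of_region_alt region_edges
instance (region_edges : List (Int × List Int)) (out : Int) : Decidable (Spec_edges_of_region region_edges out) := by unfold Spec_edges_of_region; infer_instance

-- ===== CLAIM (what is proved, stated in full; the proofs are below) =====
def Claim_equal_edges_of_region : Prop := ∀ (region_edges : List (Int × List Int)), Dom_edges_of_region region_edges → Spec_edges_of_region region_edges (edges_of_region region_edges)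

-- ===== LEMMAS AND PROOFS =====

-- number of adjacent pairs (a, b) with b ≠ a + 1
def pvAdj : List Int → Int
  | [] => 0
  | [_] => 0
  | a :: b :: t => (if b ≠ a + 1 then 1 else 0) + pvAdj (b :: t)

-- A's inner count on the sorted list, in structural form
def pvCntA : List Int → Int
  | [] => 0
  | a :: t => 1 + pvAdj (a :: t)

-- B's inner count, in Finset form
def pvCntB (v : List Int) : Int :=
  ((v.length : Int) - v.toFinset.card) +
    ((v.toFinset.filter (fun x => x - 1 ∉ v.toFinset)).card : Int)

theorem pv_foldl_enum_suffix (ys : List Int) (zs : List Int) :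
    ∀ (pre : List Int) (hpre : pre ≠ []) (acc : Int), ys = pre ++ zs →
    (PySem.List.enumerate zs (pre.length : Int)).foldl
      (fun acc p => if p.2 ≠ PySem.List.pyGetD ys (p.1 - 1) 0 + 1 then acc + 1 else acc)
      acc = acc + pvAdj (pre.getLast hpre :: zs) := by
  induction zs with
  | nil => intro pre hpre acc h; simp [PySem.List.enumerate, pvAdj]
  | cons x zs ih =>
    intro pre hpre acc h
    rw [PySem.List.enumerate_cons]
    simp only [List.foldl_cons]
    have hlen : 0 < pre.length := List.length_pos_iff.mpr hpre
    have hget : PySem.List.pyGetD ys ((pre.length : Int) - 1) 0 = pre.getLast hpre := by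
      have h1 : (0 : Int) ≤ (pre.length : Int) - 1 := by omega
      have h2 : (pre.length : Int) - 1 < (ys.length : Int) := by
        subst h; simp; omega
      rw [PySem.List.pyGetD_eq_getElem ys 0 h1 h2]
      have ht : ((pre.length : Int) - 1).toNat = pre.length - 1 := by omega
      subst h
      simp only [ht]
      rw [List.getElem_append_left (by omega)]
      exact (List.getLast_eq_getElem hpre).symm
    have hys : ys = (pre ++ [x]) ++ zs := by rw [h]; simp
    have ihx := ih (pre ++ [x]) (by simp) 
      (if x ≠ pre.getLast hpre + 1 then acc + 1 else acc) hys
    have hlast : (pre ++ [x]).getLast (by simp) = x := by simp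
    have hlen2 : (((pre ++ [x]).length : Nat) : Int) = (pre.length : Int) + 1 := by
      simp
    rw [hget]
    rw [hlen2, hlast] at ihx
    rw [ihx]
    by_cases hc : x ≠ pre.getLast hpre + 1 <;> simp [hc, pvAdj] <;> ring

theorem pv_innerA (v : List Int) (acc : Int) :
    (PySem.List.enumerate (PySem.List.sorted v (fun x => x) false)).foldl
      (fun acc p => if p.2 ≠ PySem.List.pyGetD (PySem.List.sorted v (fun x => x) false) (p.1 - 1) 0 + 1 then acc + 1 else acc)
      acc = acc + pvCntA (PySem.List.sorted v (fun x => x) false) := by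
  have hpair0 := PySem.List.sorted_pairwise v (fun x => x)
  generalize hg : PySem.List.sorted v (fun x => x) false = ys
  rw [hg] at hpair0
  cases ys with
  | nil => simp [PySem.List.enumerate, pvCntA]
  | cons a t =>
    rw [PySem.List.enumerate_cons]
    simp only [List.foldl_cons]
    have hpair : (a :: t).Pairwise (fun x y => x ≤ y) := hpair0
    have hmin : ∀ y ∈ a :: t, a ≤ y := by
      intro y hy
      rcases List.mem_cons.mp hy with h | h
      · omega
      · exact (List.pairwise_cons.mp hpair).1 y h
    have hlast : PySem.List.pyGetD (a :: t) (0 - 1) 0 = (a :: t).getLast (by simp) := by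
      have : (0 : Int) - 1 = -1 := by norm_num
      rw [this, PySem.List.pyGetD_neg_one]
    have hcond : a ≠ (a :: t).getLast (by simp) + 1 := by
      have := hmin _ (List.getLast_mem (l := a :: t) (by simp))
      omega
    rw [hlast]
    simp only [hcond, if_pos, ne_eq, not_false_eq_true]
    have := pv_foldl_enum_suffix (a :: t) t [a] (by simp) (acc + 1) (by simp)
    simp only [List.length_cons, List.length_nil, List.getLast_singleton] at this
    push_cast at this
    push_cast
    rw [this]
    simp [pvCntA]; ring

theorem pv_crux (ys : List Int) (hp : ys.Pairwise (fun x y => x ≤ y)) :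
    pvCntA ys = pvCntB ys := by
  induction ys with
  | nil => simp [pvCntA, pvCntB]
  | cons a t ih =>
    match t with
    | [] =>
      simp only [pvCntA, pvAdj, pvCntB]
      simp [Finset.filter_singleton]
    | b :: t =>
      have hab : a ≤ b := (List.pairwise_cons.mp hp).1 b (by simp)
      have hptail : (b :: t).Pairwise (fun x y => x ≤ y) := (List.pairwise_cons.mp hp).2
      have hble : ∀ x ∈ (b :: t).toFinset, b ≤ x := by
        intro x hx
        rcases List.mem_cons.mp (List.mem_toFinset.mp hx) with h | h
        · omega
        · exact (List.pairwise_cons.mp hptail).1 x h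
      have ihv := ih hptail
      set S := (b :: t).toFinset with hS
      have htf : (a :: b :: t).toFinset = insert a S := by simp [hS]
      by_cases hdup : a = b
      · -- duplicate: insert a S = S, filter unchanged, length +1, pair counts
        have hmem : a ∈ S := by rw [hS]; simp [hdup]
        have hins : insert a S = S := Finset.insert_eq_self.mpr hmem
        have hne : b ≠ a + 1 := by omega
        simp only [pvCntA, pvAdj] at ihv ⊢
        simp only [pvCntB, htf, hins]
        simp only [pvCntB] at ihv
        rw [← hS] at ihv
        rw [if_pos hne]
        simp only [List.length_cons] at ihv ⊢
        push_cast at ihv ⊢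
        omega
      · have halt : a < b := lt_of_le_of_ne hab hdup
        have hnotmem : a ∉ S := by
          intro hx; have := hble a hx; omega
        have hcard : (insert a S).card = S.card + 1 := Finset.card_insert_of_notMem hnotmem
        have hpa : (a - 1) ∉ insert a S := by
          intro hx
          rcases Finset.mem_insert.mp hx with h | h
          · omega
          · have := hble _ h; omega
        have hfilt : (insert a S).filter (fun x => x - 1 ∉ insert a S)
            = insert a (S.filter (fun x => x - 1 ∉ insert a S)) := by
          rw [Finset.filter_insert, if_pos hpa]
        by_cases hb1 : b = a + 1
        · -- b = a+1: a joins the runs, b stops being a run start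
          have hbf : b ∈ S.filter (fun x => x - 1 ∉ S) := by
            rw [Finset.mem_filter]
            refine ⟨by rw [hS]; simp, ?_⟩
            intro hx; have := hble _ hx; omega
          have hfeq : S.filter (fun x => x - 1 ∉ insert a S)
              = (S.filter (fun x => x - 1 ∉ S)).erase b := by
            ext x
            simp only [Finset.mem_filter, Finset.mem_erase, Finset.mem_insert]
            constructor
            · rintro ⟨hxS, hx⟩
              rw [not_or] at hx
              exact ⟨by omega, hxS, hx.2⟩
            · rintro ⟨hxb, hxS, hx⟩
              refine ⟨hxS, ?_⟩
              rw [not_or]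
              have := hble _ hxS
              constructor
              · omega
              · exact hx
          have hcards : ((S.filter (fun x => x - 1 ∉ S)).erase b).card
              = (S.filter (fun x => x - 1 ∉ S)).card - 1 :=
            Finset.card_erase_of_mem hbf
          have hpos : 0 < (S.filter (fun x => x - 1 ∉ S)).card :=
            Finset.card_pos.mpr ⟨b, hbf⟩
          simp only [pvCntA, pvAdj] at ihv ⊢
          simp only [pvCntB, htf] at ihv ⊢
          rw [← hS] at ihv
          rw [hfilt, hfeq]
          have hani : a ∉ ({x ∈ S | x - 1 ∉ S}).erase b := by
            intro hx
            exact hnotmem (Finset.mem_filter.mp (Finset.mem_erase.mp hx).2).1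
          rw [Finset.card_insert_of_notMem hani]
          rw [if_neg (by omega : ¬ b ≠ a + 1)]
          simp only [List.length_cons] at ihv ⊢
          push_cast at ihv ⊢
          omega
        · -- gap: a is a fresh run start, everything else unchanged
          have hfeq : S.filter (fun x => x - 1 ∉ insert a S)
              = S.filter (fun x => x - 1 ∉ S) := by
            apply Finset.filter_congr
            intro x hxS
            have hxb := hble _ hxS
            simp only [Finset.mem_insert, not_or]
            constructor
            · rintro ⟨_, h⟩; exact h
            · intro h; exact ⟨by omega, h⟩
          simp only [pvCntA, pvAdj] at ihv ⊢
          simp only [pvCntB, htf] at ihv ⊢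
          rw [← hS] at ihv
          rw [hfilt, hfeq]
          have hani : a ∉ ({x ∈ S | x - 1 ∉ S}) := by
            intro hx
            exact hnotmem (Finset.mem_filter.mp hx).1
          rw [Finset.card_insert_of_notMem hani]
          rw [if_pos hb1]
          simp only [List.length_cons] at ihv ⊢
          push_cast at ihv ⊢
          omega

theorem pv_toFinset_sorted (v : List Int) :
    (PySem.List.sorted v (fun x => x) false).toFinset = v.toFinset := by
  ext x
  simp only [List.mem_toFinset]
  exact (PySem.List.sorted_perm v (fun x => x) false).mem_iff

theorem pv_innerB (v : List Int) :
    ((v.length : Int) - PySem.Set.len (PySem.Set.ofList v)) +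
      (List.foldl (fun c x =>
        if !(PySem.Set.contains (PySem.Set.ofList v) (x - 1)) then c + 1 else c)
        (0 : Int) (PySem.Set.ofList v)) = pvCntB v := by
  set s := PySem.Set.ofList v with hs
  have hnd : (s : List Int).Nodup := PySem.Set.nodup_ofList v
  have hmem : ∀ x, x ∈ (s : List Int) ↔ x ∈ v := fun x => PySem.Set.mem_ofList v x
  have htf : (s : List Int).toFinset = v.toFinset := by
    ext x; simp only [List.mem_toFinset]; exact hmem x
  have hlen : PySem.Set.len s = (v.toFinset.card : Int) := by
    show ((s : List Int).length : Int) = _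
    rw [← htf, List.toFinset_card_of_nodup hnd]
  have hrun : (List.foldl (fun c x =>
      if !(PySem.Set.contains s (x - 1)) then c + 1 else c) (0 : Int) (s : List Int))
      = ((v.toFinset.filter (fun x => x - 1 ∉ v.toFinset)).card : Int) := by
    rw [PySem.List.foldl_if_add_one (fun x => !(PySem.Set.contains s (x - 1))) s 0]
    have h1 : List.countP (fun x => !(PySem.Set.contains s (x - 1))) (s : List Int)
        = (List.filter (fun x => !(PySem.Set.contains s (x - 1))) (s : List Int)).length :=
      List.countP_eq_length_filter
    have hfnd : (List.filter (fun x => !(PySem.Set.contains s (x - 1))) (s : List Int)).Nodup :=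
      hnd.filter _
    have h2 : (List.filter (fun x => !(PySem.Set.contains s (x - 1))) (s : List Int)).toFinset
        = v.toFinset.filter (fun x => x - 1 ∉ v.toFinset) := by
      rw [List.toFinset_filter, htf]
      have hc : ∀ y : Int, PySem.Set.contains s y = true ↔ y ∈ v := by
        intro y
        have hrfl : PySem.Set.contains s y = List.contains (s : List Int) y := rfl
        rw [hrfl, List.contains_iff_mem]
        exact hmem y
      apply Finset.ext
      intro y
      simp only [Finset.mem_filter, List.mem_toFinset, Bool.not_eq_true']
      constructor
      · rintro ⟨h1, h2⟩
        refine ⟨h1, fun hmemf => ?_⟩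
        rw [(hc (y - 1)).mpr hmemf] at h2
        simp at h2
      · rintro ⟨h1, h2⟩
        refine ⟨h1, ?_⟩
        cases hcb : PySem.Set.contains s (y - 1) with
        | false => rfl
        | true => exact absurd ((hc (y - 1)).mp hcb) h2
    rw [h1, ← List.toFinset_card_of_nodup hfnd, h2]
    norm_num
  rw [hlen, hrun, pvCntB]

-- ===== VERDICT (by name: the statement is the Claim_ definition above) =====
theorem edges_of_region_spec : Claim_equal_edges_of_region := by
  intro region_edges _
  unfold Spec_edges_of_region edges_of_region edges_of_region_alt
  apply List.foldl_ext
  intro acc v _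
  simp only
  rw [pv_innerA v acc]
  rw [pv_crux _ (by
    have := PySem.List.sorted_pairwise v (fun x => x)
    exact this)]
  have hB := pv_innerB v
  have hlenB : ((PySem.List.sorted v (fun x => x) false).length : Int) = (v.length : Int) := by
    rw [PySem.List.length_sorted]
  unfold pvCntB
  rw [pv_toFinset_sorted, hlenB, ← pvCntB]
  rw [← hB]
  ring
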